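-- pv_equiv track=rewrite | github.com/PuiuTroiu/fundamentele-programarii | Seminar12/main.py | majuascula
-- ===== SOURCE A (Python) =====
-- def majuascula(n,l):
--     if n < 0:
--         return None
--     else:
--         if l[n] >= 'A' and l[n] <= 'Z':
--             return l[n]
--         else:
--             return majuascula(n-1,l)
-- ===== SOURCE B (Python) =====
-- def majuascula(n, l):
--     for i in range(n, -1, -1):
--         if 'A' <= l[i] <= 'Z':
--             return l[i]
--     return None
-- ===== Notes on version B (the rewrite author's own statement) =====
-- stated objective: idiomatic
-- what changed: Replaces the tail recursion with an explicit backward loop over range(n, -1, -1) that returns the first element between 'A' and 'Z', keeping the exact string-range comparison.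
import Mathlib
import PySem

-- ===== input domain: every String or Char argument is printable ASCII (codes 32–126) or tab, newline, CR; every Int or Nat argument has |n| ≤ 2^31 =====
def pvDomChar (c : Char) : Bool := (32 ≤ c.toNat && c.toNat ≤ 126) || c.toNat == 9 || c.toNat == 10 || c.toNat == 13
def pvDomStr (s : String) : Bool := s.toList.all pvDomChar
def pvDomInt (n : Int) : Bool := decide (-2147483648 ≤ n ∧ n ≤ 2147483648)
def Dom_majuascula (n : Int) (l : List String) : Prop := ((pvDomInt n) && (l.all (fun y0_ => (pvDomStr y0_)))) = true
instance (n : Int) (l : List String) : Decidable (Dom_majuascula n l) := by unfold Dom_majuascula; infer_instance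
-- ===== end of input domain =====

-- B replaces A's recursion with an explicit backward loop over range(n, -1, -1); same values everywhere.


-- ===== PORT A =====
-- literal port of A's recursion; where Python raises IndexError (pyGet? = none) the port returns none,
-- those inputs are excluded by Pre_majuascula
def majuascula (n : Int) (l : List String) : Option String :=
  if n < 0 then none
  else
    match PySem.List.pyGet? l n with
    | none => none
    | some s => if "A" ≤ s ∧ s ≤ "Z" then some s else majuascula (n - 1) l
termination_by (n + 1).toNat
decreasing_by simp at *; omega

-- ===== PORT B =====
-- the body of B's for-loop: first element of l at the indices of range(n, -1, -1) lying in ["A","Z"]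
def majuasculaLoop (l : List String) : List Int → Option String
  | [] => none
  | i :: rest =>
    match PySem.List.pyGet? l i with
    | none => none
    | some s => if "A" ≤ s ∧ s ≤ "Z" then some s else majuasculaLoop l rest

def majuascula_alt (n : Int) (l : List String) : Option String :=
  majuasculaLoop l (PySem.List.pyRange n (-1) (-1))

-- ===== PRECONDITION & SPEC =====
-- A raises IndexError when 0 ≤ n and n ≥ len(l); Pre_ excludes exactly those inputs
def Pre_majuascula (n : Int) (l : List String) : Prop := n < (l.length : Int)
instance (n : Int) (l : List String) : Decidable (Pre_majuascula n l) := by unfold Pre_majuascula; infer_instance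
def pvWitness_majuascula : Int × List String := (2, ["a", "B", "c"])
def Spec_majuascula (n : Int) (l : List String) (out : Option String) : Prop := out = majuascula_alt n l
instance (n : Int) (l : List String) (out : Option String) : Decidable (Spec_majuascula n l out) := by unfold Spec_majuascula; infer_instance

-- ===== CLAIM (what is proved, stated in full; the proofs are below) =====
def Claim_equal_majuascula : Prop := ∀ (n : Int) (l : List String), Dom_majuascula n l → Pre_majuascula n l → Spec_majuascula n l (majuascula n l)

-- ===== LEMMAS AND PROOFS =====

-- the two ports agree on ALL inputs (both return none where Python would raise)
theorem majuascula_eq_alt (n : Int) (l : List String) : majuascula n l = majuascula_alt n l := by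
  unfold majuascula_alt
  by_cases h : n < 0
  · rw [majuascula, if_pos h, PySem.List.pyRange_neg_one_eq_nil (by omega)]
    rfl
  · have hk : (n + 1).toNat ≠ 0 := by omega
    generalize hm : (n + 1).toNat = m
    induction m generalizing n with
    | zero => omega
    | succ k ih =>
      rw [majuascula, if_neg h, PySem.List.pyRange_neg_one_cons (by omega)]
      simp only [majuasculaLoop]
      cases PySem.List.pyGet? l n with
      | none => rfl
      | some s =>
        simp only
        split
        · rfl
        · by_cases h' : n - 1 < 0
          · rw [majuascula, if_pos h', PySem.List.pyRange_neg_one_eq_nil (by omega)]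
            rfl
          · exact ih (n - 1) h' (by omega) (by omega)

-- ===== VERDICT (by name: the statement is the Claim_ definition above) =====
theorem majuascula_spec : Claim_equal_majuascula := by
  intro n l _ _
  unfold Spec_majuascula
  exact majuascula_eq_alt n l
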